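-- pv_equiv track=rewrite | github.com/steadydoer/problem-solving | programmers/level3/12936/pg12936.py | solution
-- ===== SOURCE A (Python) =====
-- def solution(n, k):
--     answer = []
--     elements = [i + 1 for i in range(n)]
--     k = k - 1
--     factorial = [1]
--     for i in range(1, n+1):
--         factorial.append(factorial[-1] * i)
--     while elements:
--         if len(elements) == 1:
--             answer.append(elements.pop())
--             break
--         divider = factorial[len(elements) - 1]
--         answer.append(elements.pop(elements.index(elements[k // divider])))
--         k = k % divider
--     return answer
-- ===== SOURCE B (Python) =====
-- def solution(n, k):
--     # Order-statistic selection on an implicit tournament (segment) tree: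
--     # leaves mark which of 1..n are still unused; each round descends from the
--     # root to the d-th live leaf and clears it (no Python-list pops or scans).
--     if n <= 0:
--         return []
--     size = 1
--     while size < n:
--         size *= 2
--     tree = [0] * (2 * size)
--     for i in range(n):
--         tree[size + i] = 1
--     for v in range(size - 1, 0, -1):
--         tree[v] = tree[2 * v] + tree[2 * v + 1]
--     f = 1                       # (m-1)! for the current live count m
--     for i in range(1, n):
--         f *= i
--     k -= 1
--     answer = []
--     for m in range(n, 0, -1):
--         d = (k // f) % m        # 0-based rank of the element to emit
--         k %= f
--         if m > 1:
--             f //= m - 1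
--         v = 1
--         while v < size:
--             left = tree[2 * v]
--             if d < left:
--                 v = 2 * v
--             else:
--                 d -= left
--                 v = 2 * v + 1
--         answer.append(v - size + 1)
--         while v:
--             tree[v] -= 1
--             v //= 2
--     return answer
-- ===== Notes on version B (the rewrite author's own statement) =====
-- stated objective: alternative
-- what changed: B replaces A's remaining-numbers Python list with pop/index scans by an implicit tournament (segment) tree over 1..n: each round it descends from the root to the d-th live leaf and clears it, with the factorial divider kept as a running product instead of A's precomputed table.
-- outside the precondition, e.g. on solution(3, 8): A raises IndexError, B returns [1, 3, 2]; on solution(3, -6): A raises IndexError, B returns [3, 2, 1]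
import Mathlib
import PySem

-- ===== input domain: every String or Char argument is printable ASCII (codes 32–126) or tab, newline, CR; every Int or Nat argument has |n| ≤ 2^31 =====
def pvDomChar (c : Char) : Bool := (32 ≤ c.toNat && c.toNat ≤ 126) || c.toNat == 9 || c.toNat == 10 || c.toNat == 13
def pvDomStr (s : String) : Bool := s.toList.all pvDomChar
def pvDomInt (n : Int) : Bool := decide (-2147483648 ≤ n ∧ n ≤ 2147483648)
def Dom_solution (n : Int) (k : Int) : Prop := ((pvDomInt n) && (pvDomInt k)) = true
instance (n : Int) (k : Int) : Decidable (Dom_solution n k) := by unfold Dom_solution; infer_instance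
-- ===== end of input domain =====

-- B replaces A's remaining-numbers list with its pops and index scans by an implicit
-- tournament (segment) tree over 1..n: each round descends from the root to the d-th
-- live leaf and clears it, keeping the factorial divider as a running product.

-- ===== PORT A =====
-- A's while-loop; the fuel is the initial length of `elements` (the loop pops one
-- element per iteration, so it terminates after at most that many rounds).
def solutionLoop : Nat → List Int → List Int → List Int → Int → List Int
  | 0, _, _, answer, _ => answer
  | fuel + 1, factorial, elements, answer, k =>
    if elements = [] then answer
    else if elements.length = 1 then
      -- answer.append(elements.pop()); break
      match PySem.List.pop? elements (-1) with
      | none => answer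
      | some (x, _) => answer ++ [x]
    else
      let divider := (PySem.List.pyGet? factorial ((elements.length : Int) - 1)).getD 0
      match PySem.List.pyGet? elements (PySem.Int.floordiv k divider) with
      | none => answer   -- IndexError (excluded by Pre_)
      | some v =>
        match PySem.List.index? elements v with
        | none => answer
        | some i =>
          match PySem.List.pop? elements (i : Int) with
          | none => answer
          | some (x, rest) => solutionLoop fuel factorial rest (answer ++ [x]) (PySem.Int.mod k divider)

def solution (n : Int) (k : Int) : List Int :=
  let elements := (PySem.List.pyRange 0 n).map (fun i => i + 1)
  let k1 := k - 1
  let factorial := (PySem.List.pyRange 1 (n + 1)).foldl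
    (fun f i => f ++ [(PySem.List.pyGet? f (-1)).getD 0 * i]) [1]
  solutionLoop elements.length factorial elements [] k1

-- ===== PORT B =====
-- B's tree indices (size, v, 2*v, …) are nonnegative and in range throughout, so the
-- Python list accesses tree[j] / tree[j] = x are ported exactly as Nat-indexed
-- List.getD / List.set.

-- while size < n: size *= 2   (fuel n suffices: size grows by ≥ 1 per step)
def pvGrow (n : Nat) : Nat → Nat → Nat
  | 0, s => s
  | fuel + 1, s => if s < n then pvGrow n fuel (2 * s) else s

-- while v < size: descend to the child containing the d-th live leaf
-- (fuel `size` suffices: v at least doubles per step and starts at 1)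
def pvDescend (t : List Int) (size : Nat) : Nat → Nat → Int → Nat
  | 0, v, _ => v
  | fuel + 1, v, d =>
    if v < size then
      let left := t.getD (2 * v) 0
      if d < left then pvDescend t size fuel (2 * v) d
      else pvDescend t size fuel (2 * v + 1) (d - left)
    else v

-- while v: tree[v] -= 1; v //= 2
def pvClear : List Int → Nat → List Int
  | t, 0 => t
  | t, v + 1 => pvClear (t.set (v + 1) (t.getD (v + 1) 0 - 1)) ((v + 1) / 2)
  termination_by _ v => v
  decreasing_by omega

def solution_alt (n : Int) (k : Int) : List Int :=
  if n ≤ 0 then []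
  else
    let size := pvGrow n.toNat n.toNat 1
    -- tree = [0] * (2*size); for i in range(n): tree[size+i] = 1
    let tree1 := (List.range n.toNat).foldl (fun t i => t.set (size + i) 1)
      (List.replicate (2 * size) 0)
    -- for v in range(size-1, 0, -1): tree[v] = tree[2*v] + tree[2*v+1]
    let tree2 := ((List.range' 1 (size - 1)).reverse).foldl
      (fun t v => t.set v (t.getD (2 * v) 0 + t.getD (2 * v + 1) 0)) tree1
    -- f = 1; for i in range(1, n): f *= i
    let f0 := (PySem.List.pyRange 1 n).foldl (fun f i => f * i) 1
    -- for m in range(n, 0, -1): …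
    let st := (PySem.List.pyRange n 0 (-1)).foldl
      (fun (st : List Int × Int × Int × List Int) m =>
        let d := PySem.Int.mod (PySem.Int.floordiv st.2.2.1 st.2.1) m
        let k' := PySem.Int.mod st.2.2.1 st.2.1
        let f' := if 1 < m then PySem.Int.floordiv st.2.1 (m - 1) else st.2.1
        let v := pvDescend st.1 size size 1 d
        (pvClear st.1 v, f', k', st.2.2.2 ++ [(v : Int) - (size : Int) + 1]))
      (tree2, f0, k - 1, ([] : List Int))
    st.2.2.2

-- ===== PRECONDITION & SPEC =====
-- Pre_ excludes exactly the inputs on which A raises IndexError: n ≥ 2 with k - 1 outside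
-- [-n!, n! - 1]. Within Dom (|k| ≤ 2^31 < 13!) every k is admitted once 13 ≤ n; the
-- 'min · 12' only caps the factorial computation and is equivalent on Dom.
def Pre_solution (n : Int) (k : Int) : Prop :=
  n ≤ 1 ∨ 13 ≤ n ∨
    (1 - (Nat.factorial (min n.toNat 12) : Int) ≤ k ∧ k ≤ (Nat.factorial (min n.toNat 12) : Int))
instance (n : Int) (k : Int) : Decidable (Pre_solution n k) := by unfold Pre_solution; infer_instance

def pvWitness_solution : Int × Int := (4, 10)

def Spec_solution (n : Int) (k : Int) (out : List Int) : Prop := out = solution_alt n k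
instance (n : Int) (k : Int) (out : List Int) : Decidable (Spec_solution n k out) := by unfold Spec_solution; infer_instance

-- ===== CLAIM (what is proved, stated in full; the proofs are below) =====
def Claim_equal_solution : Prop :=
  ∀ (n : Int) (k : Int), Dom_solution n k → Pre_solution n k → Spec_solution n k (solution n k)

-- ===== LEMMAS AND PROOFS =====

-- m! as an Int
def pvF (m : Nat) : Int := (Nat.factorial m : Int)

-- common abstract form of both programs: pop at digit (k // m!) mod (m+1), recurse on k mod m!
def pvSel : Nat → List Int → Int → List Int
  | 0, _, _ => []
  | m + 1, es, k =>
    match PySem.List.pop? es (PySem.Int.mod (PySem.Int.floordiv k (pvF m)) ((m : Int) + 1)) with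
    | none => []
    | some (x, rest) => x :: pvSel m rest (PySem.Int.mod k (pvF m))

lemma pvF_pos (m : Nat) : 0 < pvF m := by
  unfold pvF
  exact_mod_cast Nat.factorial_pos m

lemma pvF_succ (m : Nat) : pvF (m + 1) = ((m : Int) + 1) * pvF m := by
  unfold pvF
  rw [Nat.factorial_succ]
  push_cast
  ring

lemma pv_mod_eq_self {r b : Int} (h0 : 0 ≤ r) (h1 : r < b) : PySem.Int.mod r b = r := by
  rw [PySem.Int.mod_eq_emod_of_pos (by omega)]
  exact Int.emod_eq_of_lt h0 h1

lemma pv_mod_add_mul {b : Int} (r a : Int) (hb : 0 < b) :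
    PySem.Int.mod (r + a * b) b = PySem.Int.mod r b := by
  rw [PySem.Int.mod_eq_emod_of_pos hb, PySem.Int.mod_eq_emod_of_pos hb, mul_comm a b,
    Int.add_mul_emod_self_left]

lemma pv_floordiv_bounds {k b m : Int} (hb : 0 < b) (hlo : -(m * b) ≤ k) (hhi : k < m * b) :
    -m ≤ PySem.Int.floordiv k b ∧ PySem.Int.floordiv k b < m := by
  constructor
  · rw [PySem.Int.le_floordiv_iff_mul_le hb]; nlinarith
  · rw [PySem.Int.floordiv_lt_iff_lt_mul hb]; exact hhi

lemma pv_floordiv_mul_self {a b : Int} (ha : 0 < a) : PySem.Int.floordiv (a * b) a = b := by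
  rw [PySem.Int.floordiv_eq_iff_of_pos ha]
  constructor <;> nlinarith

lemma pv_index?_getElem {es : List Int} (h : es.Nodup) {i : Nat} (hi : i < es.length) :
    PySem.List.index? es es[i] = some i := by
  rw [PySem.List.index?_eq_some_iff]
  refine ⟨es.take i, es.drop (i + 1), ?_, ?_, ?_⟩
  · have h1 : es.take i ++ es[i] :: es.drop (i + 1) = es.take i ++ es.drop i :=
      congrArg (es.take i ++ ·) (List.getElem_cons_drop hi)
    exact ((h1.trans (List.take_append_drop i es)).symm)
  · simp [List.length_take]
    omega
  · intro hmem
    obtain ⟨j, hj, hje⟩ := List.getElem_of_mem hmem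
    have hjlen : j < i := by
      simp [List.length_take] at hj
      omega
    have hee : es[j] = es[i] := by
      rw [← hje]
      exact (List.getElem_take).symm
    have := (List.Nodup.getElem_inj_iff h).mp hee
    omega

-- A's factorial table is [0!, 1!, …, N!]
lemma pv_facList (N : Nat) :
    (PySem.List.pyRange 1 ((N : Int) + 1)).foldl
      (fun f i => f ++ [(PySem.List.pyGet? f (-1)).getD 0 * i]) [1]
    = (List.range (N + 1)).map (fun j => pvF j) := by
  induction N with
  | zero =>
    rw [show ((0 : Nat) : Int) + 1 = 1 by norm_num, PySem.List.pyRange_one_eq_nil (le_refl 1)]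
    simp [pvF]
  | succ N ih =>
    rw [show (((N + 1 : Nat)) : Int) + 1 = ((N : Int) + 1) + 1 by push_cast; ring,
      PySem.List.pyRange_one_succ_right (by omega : (1 : Int) ≤ (N : Int) + 1),
      List.foldl_append, ih]
    simp only [List.foldl_cons, List.foldl_nil]
    have hlast : PySem.List.pyGet? ((List.range (N + 1)).map (fun j => pvF j)) (-1)
        = some (pvF N) := by
      rw [PySem.List.pyGet?_neg_one, List.range_succ]
      simp
    rw [hlast]
    rw [show List.range (N + 1 + 1) = List.range (N + 1) ++ [N + 1] from List.range_succ]
    simp [pvF_succ]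
    ring

lemma pv_fac_get {N j : Nat} (h : j < N + 1) :
    PySem.List.pyGet? ((List.range (N + 1)).map (fun j => pvF j)) (j : Int) = some (pvF j) := by
  rw [PySem.List.pyGet?_natCast]
  simp [h]

-- A's loop computes pvSel
lemma pv_ALoop (m : Nat) : ∀ (es ans : List Int) (k : Int) (fac : List Int),
    es.Nodup → es.length = m →
    (∀ j : Nat, j < m → PySem.List.pyGet? fac (j : Int) = some (pvF j)) →
    (2 ≤ m → -pvF m ≤ k ∧ k < pvF m) →
    solutionLoop m fac es ans k = ans ++ pvSel m es k := by
  induction m with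
  | zero =>
    intro es ans k fac hnd hlen hfac hk
    simp [solutionLoop, pvSel]
  | succ m ih =>
    intro es ans k fac hnd hlen hfac hk
    have hne : es ≠ [] := by
      intro h; rw [h] at hlen; simp at hlen
    rcases Nat.eq_zero_or_pos m with hm | hm
    · subst hm
      obtain ⟨v, hv⟩ := List.length_eq_one_iff.mp hlen
      subst hv
      have hpop : PySem.List.pop? [v] (-1) = some (v, []) := by
        simpa using PySem.List.pop?_last [] v
      simp [solutionLoop, pvSel, hpop, pvF, PySem.List.pop?_zero_cons]
    · -- es.length = m + 1 ≥ 2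
      have hFm := pvF_pos m
      have hpos : (0 : Int) < (m : Int) + 1 := by positivity
      have hb := hk (by omega)
      rw [pvF_succ] at hb
      have hq := pv_floordiv_bounds (k := k) (b := pvF m) (m := (m : Int) + 1) hFm
        (by linarith [hb.1]) hb.2
      set q := PySem.Int.floordiv k (pvF m) with hqdef
      set i := PySem.Int.mod q ((m : Int) + 1) with hidef
      have hi0 : 0 ≤ i := PySem.Int.mod_nonneg q hpos
      have hi1 : i < (m : Int) + 1 := PySem.Int.mod_lt q hpos
      have hiN : i.toNat < es.length := by omega
      -- the indexing expression fetches es[i.toNat]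
      have hget : PySem.List.pyGet? es q = some es[i.toNat] := by
        by_cases hq0 : 0 ≤ q
        · have hiq : i = q := by rw [hidef]; exact pv_mod_eq_self hq0 hq.2
          rw [PySem.List.pyGet?_of_nonneg es hq0]
          rw [show q.toNat = i.toNat by omega]
          exact List.getElem?_eq_getElem hiN
        · rw [not_le] at hq0
          have ht1 : 0 < (-q).toNat := by omega
          have ht2 : (-q).toNat ≤ es.length := by omega
          have hiq : i = q + ((m : Int) + 1) := by
            have h1 : PySem.Int.mod (q + 1 * ((m : Int) + 1)) ((m : Int) + 1)
                = PySem.Int.mod q ((m : Int) + 1) := pv_mod_add_mul q 1 hpos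
            have h2 : PySem.Int.mod (q + 1 * ((m : Int) + 1)) ((m : Int) + 1)
                = q + ((m : Int) + 1) := by
              rw [show q + 1 * ((m : Int) + 1) = q + ((m : Int) + 1) by ring]
              exact pv_mod_eq_self (by omega) (by omega)
            rw [hidef, ← h1, h2]
          have hqt : q = -(((-q).toNat : Nat) : Int) := by omega
          rw [hqt, PySem.List.pyGet?_neg_natCast es (-q).toNat ht1 ht2]
          rw [show es.length - (-q).toNat = i.toNat by omega]
          exact List.getElem?_eq_getElem hiN
      have hidx := pv_index?_getElem hnd hiN
      have hpop := PySem.List.pop?_natCast es i.toNat hiN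
      -- unfold one loop iteration
      rw [solutionLoop]
      rw [if_neg hne, if_neg (by rw [hlen]; omega : ¬ es.length = 1)]
      have hdivider : (PySem.List.pyGet? fac ((es.length : Int) - 1)).getD 0 = pvF m := by
        rw [show ((es.length : Int) - 1) = ((m : Nat) : Int) by rw [hlen]; push_cast; ring,
          hfac m (by omega)]
        rfl
      simp only [hdivider, ← hqdef, hget, hidx, hpop]
      -- recursive call
      have hnd' : (es.eraseIdx i.toNat).Nodup := hnd.sublist (List.eraseIdx_sublist es i.toNat)
      have hlen' : (es.eraseIdx i.toNat).length = m := by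
        rw [List.length_eraseIdx_of_lt hiN]; omega
      have hk' : 2 ≤ m → -pvF m ≤ PySem.Int.mod k (pvF m) ∧ PySem.Int.mod k (pvF m) < pvF m := by
        intro _
        exact ⟨by linarith [PySem.Int.mod_nonneg k hFm], PySem.Int.mod_lt k hFm⟩
      rw [ih (es.eraseIdx i.toNat) (ans ++ [es[i.toNat]]) (PySem.Int.mod k (pvF m)) fac
        hnd' hlen' (fun j hj => hfac j (by omega)) hk']
      -- fold the right-hand side
      conv_rhs => rw [pvSel]
      rw [show PySem.Int.mod (PySem.Int.floordiv k (pvF m)) ((m : Int) + 1) = ((i.toNat : Nat) : Int) by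
        rw [← hqdef, ← hidef]; omega]
      rw [hpop]
      simp

-- ===== segment-tree lemmas for B =====

-- the leaf indices (0-based) below node v of the implicit tree of width `size`
def pvLeaves (size : Nat) : Nat → List Nat
  | 0 => []
  | v + 1 =>
    if _h : size ≤ v + 1 then [v + 1 - size]
    else pvLeaves size (2 * (v + 1)) ++ pvLeaves size (2 * (v + 1) + 1)
  termination_by v => 2 * size - v
  decreasing_by all_goals omega

def pvSpec (size : Nat) (w : Nat → Int) (v : Nat) : Int := ((pvLeaves size v).map w).sum

def pvLive (size : Nat) (w : Nat → Int) (v : Nat) : List Nat :=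
  (pvLeaves size v).filter (fun i => w i = 1)

def pvInv (size : Nat) (t : List Int) (w : Nat → Int) : Prop :=
  t.length = 2 * size ∧ ∀ v, 1 ≤ v → v < 2 * size → t.getD v 0 = pvSpec size w v

lemma pvLeaves_leaf {size v : Nat} (h : size ≤ v) (h1 : 1 ≤ v) :
    pvLeaves size v = [v - size] := by
  cases v with
  | zero => omega
  | succ u => rw [pvLeaves, dif_pos h]

lemma pvLeaves_node {size v : Nat} (h : v < size) (h1 : 1 ≤ v) :
    pvLeaves size v = pvLeaves size (2 * v) ++ pvLeaves size (2 * v + 1) := by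
  cases v with
  | zero => omega
  | succ u => rw [pvLeaves, dif_neg (by omega)]

lemma pvSpec_leaf {size v : Nat} (w : Nat → Int) (h : size ≤ v) (h1 : 1 ≤ v) :
    pvSpec size w v = w (v - size) := by
  rw [pvSpec, pvLeaves_leaf h h1]; simp

lemma pvSpec_node {size v : Nat} (w : Nat → Int) (h : v < size) (h1 : 1 ≤ v) :
    pvSpec size w v = pvSpec size w (2 * v) + pvSpec size w (2 * v + 1) := by
  rw [pvSpec, pvSpec, pvSpec, pvLeaves_node h h1]; simp

lemma pvLive_node {size v : Nat} (w : Nat → Int) (h : v < size) (h1 : 1 ≤ v) :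
    pvLive size w v = pvLive size w (2 * v) ++ pvLive size w (2 * v + 1) := by
  rw [pvLive, pvLive, pvLive, pvLeaves_node h h1, List.filter_append]

-- shape of the leaf list, for a power-of-two size
lemma pvLeaves_shape {L : Nat} (size : Nat) (hsize : size = 2 ^ L) :
    ∀ (h v : Nat), 1 ≤ v → size ≤ v * 2 ^ h → v * 2 ^ h < 2 * size →
    pvLeaves size v = List.range' (v * 2 ^ h - size) (2 ^ h) := by
  intro h
  induction h with
  | zero =>
    intro v h1 hh1 hh2
    rw [pow_zero, mul_one] at hh1 hh2 ⊢
    rw [pvLeaves_leaf hh1 h1]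
    rfl
  | succ h ih =>
    intro v h1 hh1 hh2
    have hp : 0 < 2 ^ h := Nat.two_pow_pos h
    have hp1 : 0 < 2 ^ (h + 1) := Nat.two_pow_pos (h + 1)
    have hv : v < size := by
      by_contra hns
      push_neg at hns
      have h2 : (2 : Nat) ≤ 2 ^ (h + 1) := by
        calc (2 : Nat) = 2 ^ 1 := by norm_num
        _ ≤ 2 ^ (h + 1) := Nat.pow_le_pow_right (by omega) (by omega)
      nlinarith
    -- h + 1 ≤ L, and (v+1) * 2^(h+1) ≤ 2^(L+1)
    have hL1 : h + 1 ≤ L := by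
      by_contra hc
      push_neg at hc
      have hle : 2 ^ (L + 1) ≤ 2 ^ (h + 1) := Nat.pow_le_pow_right (by omega) (by omega)
      have : v * 2 ^ (h + 1) < 2 ^ (L + 1) := by
        have : 2 * size = 2 ^ (L + 1) := by rw [hsize, pow_succ]; ring
        omega
      nlinarith
    have hvlt : v < 2 ^ (L - h) := by
      have he : 2 ^ (L - h) * 2 ^ (h + 1) = 2 ^ (L + 1) := by
        rw [← pow_add]
        congr 1
        omega
      have h2size : 2 * size = 2 ^ (L + 1) := by rw [hsize, pow_succ]; ring
      have : v * 2 ^ (h + 1) < 2 ^ (L - h) * 2 ^ (h + 1) := by omega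
      exact Nat.lt_of_mul_lt_mul_right this
    have hup : (v + 1) * 2 ^ (h + 1) ≤ 2 ^ (L + 1) := by
      have he : 2 ^ (L - h) * 2 ^ (h + 1) = 2 ^ (L + 1) := by
        rw [← pow_add]
        congr 1
        omega
      have : (v + 1) * 2 ^ (h + 1) ≤ 2 ^ (L - h) * 2 ^ (h + 1) :=
        Nat.mul_le_mul_right _ (by omega)
      omega
    have h2size : 2 * size = 2 ^ (L + 1) := by rw [hsize, pow_succ]; ring
    have e1 : 2 * v * 2 ^ h = v * 2 ^ (h + 1) := by rw [pow_succ]; ring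
    have e2 : (2 * v + 1) * 2 ^ h = v * 2 ^ (h + 1) + 2 ^ h := by rw [pow_succ]; ring
    have e3 : (2 * v + 2) * 2 ^ h = (v + 1) * 2 ^ (h + 1) := by rw [pow_succ]; ring
    have e6 : (2 * v + 2) * 2 ^ h = (2 * v + 1) * 2 ^ h + 2 ^ h := by ring
    have hc1 : size ≤ 2 * v * 2 ^ h := by omega
    have hc2 : 2 * v * 2 ^ h < 2 * size := by omega
    have hc3 : size ≤ (2 * v + 1) * 2 ^ h := by omega
    have hc4 : (2 * v + 1) * 2 ^ h < 2 * size := by omega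
    rw [pvLeaves_node hv h1, ih (2 * v) (by omega) hc1 hc2, ih (2 * v + 1) (by omega) hc3 hc4]
    rw [show (2 * v + 1) * 2 ^ h - size = (2 * v * 2 ^ h - size) + 2 ^ h by omega]
    rw [List.range'_append_1]
    congr 1 <;> omega

lemma pvDepth {L : Nat} (size : Nat) (hsize : size = 2 ^ L) (u : Nat)
    (h1 : 1 ≤ u) (h2 : u < 2 * size) :
    ∃ h, size ≤ u * 2 ^ h ∧ u * 2 ^ h < 2 * size := by
  have h2size : 2 * size = 2 ^ (L + 1) := by rw [hsize, pow_succ]; ring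
  set t := Nat.log2 u with ht
  have h2t : 2 ^ t ≤ u := Nat.log2_self_le (by omega)
  have h2t' : u < 2 ^ (t + 1) := Nat.lt_log2_self
  have htL : t ≤ L := by
    by_contra hc
    push_neg at hc
    have : 2 ^ (L + 1) ≤ 2 ^ t := Nat.pow_le_pow_right (by omega) (by omega)
    omega
  refine ⟨L - t, ?_, ?_⟩
  · have he : 2 ^ t * 2 ^ (L - t) = 2 ^ L := by
      rw [← pow_add]
      congr 1
      omega
    calc size = 2 ^ L := hsize
    _ = 2 ^ t * 2 ^ (L - t) := he.symm
    _ ≤ u * 2 ^ (L - t) := Nat.mul_le_mul_right _ h2t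
  · have he : 2 ^ (t + 1) * 2 ^ (L - t) = 2 ^ (L + 1) := by
      rw [← pow_add]
      congr 1
      omega
    calc u * 2 ^ (L - t) < 2 ^ (t + 1) * 2 ^ (L - t) :=
      Nat.mul_lt_mul_of_lt_of_le h2t' (le_refl _) (Nat.two_pow_pos _)
    _ = 2 ^ (L + 1) := he
    _ = 2 * size := h2size.symm

lemma pvLeaves_nodup {L : Nat} (size : Nat) (hsize : size = 2 ^ L) (v : Nat)
    (h1 : 1 ≤ v) (h2 : v < 2 * size) : (pvLeaves size v).Nodup := by
  obtain ⟨h, hh1, hh2⟩ := pvDepth size hsize v h1 h2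
  rw [pvLeaves_shape size hsize h v h1 hh1 hh2]
  exact List.nodup_range'

lemma pvLeaves_root {L : Nat} (size : Nat) (hsize : size = 2 ^ L) :
    pvLeaves size 1 = List.range size := by
  have hp : 0 < 2 ^ L := Nat.two_pow_pos L
  rw [pvLeaves_shape size hsize L 1 (le_refl 1) (by rw [hsize, one_mul])
    (by rw [hsize, one_mul]; omega), one_mul, hsize, Nat.sub_self, List.range_eq_range']

-- membership in a node's leaf list
lemma pv_mem_leaves {L : Nat} (size : Nat) (hsize : size = 2 ^ L) {u h : Nat}
    (h1 : 1 ≤ u) (hh1 : size ≤ u * 2 ^ h) (hh2 : u * 2 ^ h < 2 * size) (i : Nat) :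
    i ∈ pvLeaves size u ↔ u * 2 ^ h ≤ i + size ∧ i + size < (u + 1) * 2 ^ h := by
  rw [pvLeaves_shape size hsize h u h1 hh1 hh2, List.mem_range'_1,
    show (u + 1) * 2 ^ h = u * 2 ^ h + 2 ^ h by ring]
  omega

-- the ancestor chain visited by pvClear
def pvChain : Nat → List Nat
  | 0 => []
  | v + 1 => (v + 1) :: pvChain ((v + 1) / 2)
  termination_by v => v
  decreasing_by omega

lemma pvChain_le : ∀ v x, x ∈ pvChain v → x ≤ v := by
  intro v
  induction v using Nat.strong_induction_on with
  | _ v ih =>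
    intro x hx
    cases v with
    | zero => simp [pvChain] at hx
    | succ u =>
      rw [pvChain] at hx
      rcases List.mem_cons.mp hx with h | h
      · omega
      · have := ih ((u + 1) / 2) (by omega) x h
        omega

lemma pvChain_mem_iff : ∀ v u, 1 ≤ u → (u ∈ pvChain v ↔ ∃ c, v / 2 ^ c = u) := by
  intro v
  induction v using Nat.strong_induction_on with
  | _ v ih =>
    intro u hu
    cases v with
    | zero =>
      rw [pvChain]
      simp only [List.not_mem_nil, false_iff, not_exists]
      intro c hc
      rw [Nat.zero_div] at hc
      omega
    | succ t =>
      rw [pvChain]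
      constructor
      · intro hx
        rcases List.mem_cons.mp hx with h | h
        · exact ⟨0, by simpa using h.symm⟩
        · obtain ⟨c, hc⟩ := (ih ((t + 1) / 2) (by omega) u hu).mp h
          refine ⟨c + 1, ?_⟩
          rw [pow_succ, mul_comm, ← Nat.div_div_eq_div_mul]
          exact hc
      · rintro ⟨c, hc⟩
        cases c with
        | zero =>
          rw [pow_zero, Nat.div_one] at hc
          exact List.mem_cons.mpr (Or.inl hc.symm)
        | succ c =>
          refine List.mem_cons.mpr (Or.inr ?_)
          refine (ih ((t + 1) / 2) (by omega) u hu).mpr ⟨c, ?_⟩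
          rw [pow_succ, mul_comm, ← Nat.div_div_eq_div_mul] at hc
          exact hc

-- chain membership = ancestorship, for a leaf l
lemma pv_chain_ancestor {L : Nat} (size : Nat) (hsize : size = 2 ^ L) {l u : Nat}
    (hl1 : size ≤ l) (hl2 : l < 2 * size) (hu1 : 1 ≤ u) (hu2 : u < 2 * size) :
    u ∈ pvChain l ↔ (l - size) ∈ pvLeaves size u := by
  obtain ⟨h, hh1, hh2⟩ := pvDepth size hsize u hu1 hu2
  have hp : 0 < 2 ^ h := Nat.two_pow_pos h
  have h2size : 2 * size = 2 ^ (L + 1) := by rw [hsize, pow_succ]; ring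
  have hL : h ≤ L := by
    by_contra hc
    push_neg at hc
    have : 2 ^ (L + 1) ≤ 2 ^ h := Nat.pow_le_pow_right (by omega) (by omega)
    nlinarith
  rw [pvChain_mem_iff l u hu1, pv_mem_leaves size hsize hu1 hh1 hh2,
    show l - size + size = l by omega]
  have hdiv_lt : l < (l / 2 ^ h + 1) * 2 ^ h := by
    have hdm := Nat.div_add_mod l (2 ^ h)
    have hml := Nat.mod_lt l hp
    have he : (l / 2 ^ h + 1) * 2 ^ h = 2 ^ h * (l / 2 ^ h) + 2 ^ h := by ring
    omega
  have key : l / 2 ^ h = u ↔ (u * 2 ^ h ≤ l ∧ l < (u + 1) * 2 ^ h) := by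
    constructor
    · rintro rfl
      refine ⟨?_, hdiv_lt⟩
      calc l / 2 ^ h * 2 ^ h = 2 ^ h * (l / 2 ^ h) := by ring
      _ ≤ l := Nat.mul_div_le l (2 ^ h)
    · rintro ⟨ha, hb⟩
      have h1 := (Nat.le_div_iff_mul_le hp).mpr ha
      have h2 : l / 2 ^ h < u + 1 := by
        rw [Nat.div_lt_iff_lt_mul hp]
        calc l < (u + 1) * 2 ^ h := hb
        _ = (u + 1) * 2 ^ h := rfl
      omega
  constructor
  · rintro ⟨c, hc⟩
    rcases lt_trichotomy c h with hch | hch | hch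
    · exfalso
      -- c < h would put l below size
      have hu_lt : u < 2 ^ (L + 1 - h) := by
        have he : 2 ^ (L + 1 - h) * 2 ^ h = 2 ^ (L + 1) := by
          rw [← pow_add]
          congr 1
          omega
        have : u * 2 ^ h < 2 ^ (L + 1 - h) * 2 ^ h := by omega
        exact Nat.lt_of_mul_lt_mul_right this
      have hlt : l < (u + 1) * 2 ^ c := by
        have hdm := Nat.div_add_mod l (2 ^ c)
        have hml := Nat.mod_lt l (Nat.two_pow_pos c)
        have he : (u + 1) * 2 ^ c = 2 ^ c * u + 2 ^ c := by ring
        have : 2 ^ c * (l / 2 ^ c) = 2 ^ c * u := by rw [hc]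
        omega
      have hsmall : (u + 1) * 2 ^ c ≤ 2 ^ L := by
        calc (u + 1) * 2 ^ c ≤ 2 ^ (L + 1 - h) * 2 ^ c := Nat.mul_le_mul_right _ (by omega)
        _ = 2 ^ (L + 1 - h + c) := by rw [← pow_add]
        _ ≤ 2 ^ L := Nat.pow_le_pow_right (by omega) (by omega)
      omega
    · subst hch
      exact key.mp hc
    · exfalso
      -- c > h would put u's subtree above l
      have hge : u * 2 ^ c ≤ l := by
        have : u * 2 ^ c = 2 ^ c * (l / 2 ^ c) := by rw [hc]; ring
        rw [this]
        exact Nat.mul_div_le l (2 ^ c)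
      have he : u * 2 ^ c = u * 2 ^ h * 2 ^ (c - h) := by
        rw [mul_assoc, ← pow_add]
        congr 2
        omega
      have h2le : (2 : Nat) ≤ 2 ^ (c - h) := by
        calc (2 : Nat) = 2 ^ 1 := by norm_num
        _ ≤ 2 ^ (c - h) := Nat.pow_le_pow_right (by omega) (by omega)
      nlinarith
  · intro hi
    exact ⟨h, key.mpr hi⟩

lemma pvClear_length : ∀ v (t : List Int), (pvClear t v).length = t.length := by
  intro v
  induction v using Nat.strong_induction_on with
  | _ v ih =>
    intro t
    cases v with
    | zero => simp [pvClear]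
    | succ u => rw [pvClear, ih ((u + 1) / 2) (by omega), List.length_set]

lemma pvClear_getD : ∀ v (t : List Int) (u : Nat), 1 ≤ u → u < t.length →
    (pvClear t v).getD u 0 = t.getD u 0 - (if u ∈ pvChain v then 1 else 0) := by
  intro v
  induction v using Nat.strong_induction_on with
  | _ v ih =>
    intro t u hu1 hu2
    cases v with
    | zero => simp [pvClear, pvChain]
    | succ x =>
      rw [pvClear, pvChain]
      rw [ih ((x + 1) / 2) (by omega) _ u hu1 (by rw [List.length_set]; exact hu2)]
      have hnot : (x + 1) ∉ pvChain ((x + 1) / 2) := by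
        intro hmem
        have := pvChain_le _ _ hmem
        omega
      by_cases he : u = x + 1
      · subst he
        rw [if_neg hnot, if_pos (List.mem_cons.mpr (Or.inl rfl))]
        have hset : (t.set (x + 1) (t.getD (x + 1) 0 - 1)).getD (x + 1) 0
            = t.getD (x + 1) 0 - 1 := by
          rw [List.getD_eq_getElem?_getD, List.getElem?_set_self hu2, Option.getD_some,
            List.getD_eq_getElem?_getD]
        rw [hset]
        ring
      · have hset : (t.set (x + 1) (t.getD (x + 1) 0 - 1)).getD u 0 = t.getD u 0 := by
          simp [List.getD_eq_getElem?_getD, List.getElem?_set_ne (by omega : x + 1 ≠ u)]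
        rw [hset]
        congr 1
        have : (u ∈ (x + 1) :: pvChain ((x + 1) / 2)) ↔ (u ∈ pvChain ((x + 1) / 2)) := by
          rw [List.mem_cons]
          constructor
          · rintro (hh | hh)
            · omega
            · exact hh
          · exact Or.inr
        by_cases hm : u ∈ pvChain ((x + 1) / 2)
        · rw [if_pos hm, if_pos (this.mpr hm)]
        · rw [if_neg hm, if_neg (fun hc => hm (this.mp hc))]

-- sum of a 0/1 map is the length of the filtered list
lemma pv_sum01 (w : Nat → Int) : ∀ (l : List Nat), (∀ i ∈ l, w i = 0 ∨ w i = 1) →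
    (l.map w).sum = ((l.filter (fun i => w i = 1)).length : Int) := by
  intro l
  induction l with
  | nil => intro _; simp
  | cons x xs ih =>
    intro h01
    rcases h01 x (by simp) with h | h <;>
      simp [List.filter_cons, h, ih (fun i hi => h01 i (by simp [hi]))] <;> push_cast <;> ring

lemma pv_sum_update (w : Nat → Int) (x : Nat) (c : Int) : ∀ (l : List Nat),
    ((l.map (fun i => if i = x then w i - c else w i)).sum
      = (l.map w).sum - c * (l.count x : Int)) := by
  intro l
  induction l with
  | nil => simp
  | cons y ys ih =>
    by_cases hy : y = x <;>
      simp [List.count_cons, hy, ih] <;> push_cast <;> ring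

-- pvClear maintains the invariant for the weight with the cleared leaf decremented
lemma pvClear_inv {L : Nat} (size : Nat) (hsize : size = 2 ^ L) (t : List Int)
    (w : Nat → Int) (hinv : pvInv size t w) {l : Nat} (hl1 : size ≤ l) (hl2 : l < 2 * size) :
    pvInv size (pvClear t l) (fun i => if i = l - size then w i - 1 else w i) := by
  obtain ⟨hlen, hget⟩ := hinv
  refine ⟨by rw [pvClear_length, hlen], ?_⟩
  intro u hu1 hu2
  rw [pvClear_getD l t u hu1 (by omega), hget u hu1 hu2]
  obtain ⟨h, hh1, hh2⟩ := pvDepth size hsize u hu1 hu2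
  have hnd := pvLeaves_nodup size hsize u hu1 hu2
  show pvSpec size w u - _ = pvSpec size (fun i => if i = l - size then w i - 1 else w i) u
  unfold pvSpec
  rw [pv_sum_update w (l - size) 1]
  by_cases hmem : (l - size) ∈ pvLeaves size u
  · rw [if_pos ((pv_chain_ancestor size hsize hl1 hl2 hu1 hu2).mpr hmem)]
    have hcount : (pvLeaves size u).count (l - size) = 1 := by
      have h1 : 0 < (pvLeaves size u).count (l - size) := List.count_pos_iff.mpr hmem
      have h2 : (pvLeaves size u).count (l - size) ≤ 1 :=
        List.nodup_iff_count_le_one.mp hnd (l - size)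
      omega
    rw [hcount]
    push_cast
    ring
  · rw [if_neg (fun hc => hmem ((pv_chain_ancestor size hsize hl1 hl2 hu1 hu2).mp hc))]
    rw [List.count_eq_zero_of_not_mem hmem]
    push_cast
    ring

-- descent finds the d-th live leaf below v
lemma pvDescend_ok {L : Nat} (size : Nat) (hsize : size = 2 ^ L) (t : List Int)
    (w : Nat → Int) (hinv : pvInv size t w) (h01 : ∀ i, w i = 0 ∨ w i = 1) :
    ∀ (fuel v : Nat) (d : Int), 1 ≤ v → v < 2 * size → size ≤ v * 2 ^ fuel →
    0 ≤ d → d < pvSpec size w v →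
    size ≤ pvDescend t size fuel v d ∧ pvDescend t size fuel v d < 2 * size ∧
      (pvLive size w v)[d.toNat]? = some (pvDescend t size fuel v d - size) := by
  intro fuel
  induction fuel with
  | zero =>
    intro v d h1 h2 hf hd0 hd1
    rw [pow_zero, mul_one] at hf
    rw [pvDescend]
    have hsp := pvSpec_leaf w hf h1
    rcases h01 (v - size) with h | h
    · rw [hsp, h] at hd1
      omega
    · have hd : d = 0 := by
        rw [hsp, h] at hd1
        omega
      subst hd
      refine ⟨hf, h2, ?_⟩
      simp [pvLive, pvLeaves_leaf hf h1, h]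
  | succ fuel ih =>
    intro v d h1 h2 hf hd0 hd1
    by_cases hv : v < size
    · rw [show pvDescend t size (fuel + 1) v d
          = (if d < t.getD (2 * v) 0 then pvDescend t size fuel (2 * v) d
             else pvDescend t size fuel (2 * v + 1) (d - t.getD (2 * v) 0)) by
        rw [pvDescend, if_pos hv]]
      have hleft : t.getD (2 * v) 0 = pvSpec size w (2 * v) :=
        hinv.2 (2 * v) (by omega) (by omega)
      have hnode := pvSpec_node w hv h1
      have hlive := pvLive_node w hv h1
      have hlen2 : pvSpec size w (2 * v) = ((pvLive size w (2 * v)).length : Int) := by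
        unfold pvSpec pvLive
        exact pv_sum01 w _ (fun i _ => h01 i)
      have hlen3 : pvSpec size w (2 * v + 1) = ((pvLive size w (2 * v + 1)).length : Int) := by
        unfold pvSpec pvLive
        exact pv_sum01 w _ (fun i _ => h01 i)
      have hfc : size ≤ 2 * v * 2 ^ fuel := by
        have he : 2 * v * 2 ^ fuel = v * 2 ^ (fuel + 1) := by rw [pow_succ]; ring
        omega
      by_cases hdl : d < t.getD (2 * v) 0
      · rw [if_pos hdl]
        rw [hleft] at hdl
        have hrec := ih (2 * v) d (by omega) (by omega) hfc hd0 hdl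
        refine ⟨hrec.1, hrec.2.1, ?_⟩
        have hdn : d.toNat < (pvLive size w (2 * v)).length := by
          rw [hlen2] at hdl
          omega
        rw [hlive, List.getElem?_append_left hdn]
        exact hrec.2.2
      · rw [if_neg hdl]
        rw [not_lt] at hdl
        have hd0' : (0 : Int) ≤ d - t.getD (2 * v) 0 := by omega
        have hd1' : d - t.getD (2 * v) 0 < pvSpec size w (2 * v + 1) := by
          rw [hleft]
          omega
        have hf' : size ≤ (2 * v + 1) * 2 ^ fuel := by
          have h1' : 2 * v * 2 ^ fuel ≤ (2 * v + 1) * 2 ^ fuel :=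
            Nat.mul_le_mul_right _ (by omega)
          omega
        have hrec := ih (2 * v + 1) (d - t.getD (2 * v) 0) (by omega) (by omega) hf' hd0' hd1'
        refine ⟨hrec.1, hrec.2.1, ?_⟩
        have hge : (pvLive size w (2 * v)).length ≤ d.toNat := by
          rw [hleft, hlen2] at hdl
          omega
        rw [hlive, List.getElem?_append_right hge]
        rw [show d.toNat - (pvLive size w (2 * v)).length = (d - t.getD (2 * v) 0).toNat by
          rw [hleft, hlen2] at hdl ⊢
          omega]
        exact hrec.2.2
    · rw [show pvDescend t size (fuel + 1) v d = v by rw [pvDescend, if_neg hv]]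
      rw [not_lt] at hv
      have hsp := pvSpec_leaf w hv h1
      rcases h01 (v - size) with h | h
      · rw [hsp, h] at hd1
        omega
      · have hd : d = 0 := by
          rw [hsp, h] at hd1
          omega
        subst hd
        refine ⟨hv, h2, ?_⟩
        simp [pvLive, pvLeaves_leaf hv h1, h]

-- ===== build lemmas =====

lemma pv_leaf_fold_length (size : Nat) : ∀ (l : List Nat) (t : List Int),
    (l.foldl (fun t i => t.set (size + i) 1) t).length = t.length := by
  intro l
  induction l with
  | nil => intro t; rfl
  | cons x xs ih => intro t; rw [List.foldl_cons, ih, List.length_set]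

lemma pv_build_leaf (size n : Nat) (hn : n ≤ size) (j : Nat) (hj : j < 2 * size) :
    ((List.range n).foldl (fun t i => t.set (size + i) 1)
        (List.replicate (2 * size) (0 : Int))).getD j 0
      = if size ≤ j ∧ j < size + n then (1 : Int) else 0 := by
  induction n with
  | zero =>
    rw [List.range_zero, List.foldl_nil]
    rw [List.getD_eq_getElem?_getD, List.getElem?_replicate]
    rw [if_pos hj, if_neg (by omega)]
    rfl
  | succ n ih =>
    rw [List.range_succ, List.foldl_append, List.foldl_cons, List.foldl_nil]
    have hlen : ((List.range n).foldl (fun t i => t.set (size + i) 1)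
        (List.replicate (2 * size) (0 : Int))).length = 2 * size := by
      have h := pv_leaf_fold_length size (List.range n) (List.replicate (2 * size) (0 : Int))
      rw [List.length_replicate] at h
      exact h
    by_cases hjn : j = size + n
    · subst hjn
      rw [List.getD_eq_getElem?_getD, List.getElem?_set_self (by omega), Option.getD_some]
      rw [if_pos ⟨by omega, by omega⟩]
    · rw [List.getD_eq_getElem?_getD, List.getElem?_set_ne (by omega : size + n ≠ j),
        ← List.getD_eq_getElem?_getD, ih (by omega)]
      by_cases hc : size ≤ j ∧ j < size + n
      · rw [if_pos hc, if_pos ⟨hc.1, by omega⟩]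
      · rw [if_neg hc, if_neg (by omega)]

lemma pv_build_internal (size : Nat) (w : Nat → Int) :
    ∀ (j : Nat) (t : List Int), j < size → t.length = 2 * size →
    (∀ u, j < u → u < 2 * size → t.getD u 0 = pvSpec size w u) →
    pvInv size (((List.range' 1 j).reverse).foldl
      (fun t v => t.set v (t.getD (2 * v) 0 + t.getD (2 * v + 1) 0)) t) w := by
  intro j
  induction j with
  | zero =>
    intro t hj hlen hup
    rw [List.range'_zero, List.reverse_nil, List.foldl_nil]
    exact ⟨hlen, fun u hu1 hu2 => hup u (by omega) hu2⟩
  | succ j ih =>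
    intro t hj hlen hup
    have hsplit : (List.range' 1 (j + 1)).reverse = (1 + j) :: (List.range' 1 j).reverse := by
      rw [List.range'_concat, List.reverse_append]
      simp
    rw [hsplit, List.foldl_cons]
    have h1j : 1 + j = j + 1 := by omega
    rw [h1j]
    refine ih _ (by omega) (by rw [List.length_set]; exact hlen) ?_
    intro u hu hu2
    by_cases he : u = j + 1
    · subst he
      rw [List.getD_eq_getElem?_getD, List.getElem?_set_self (by omega)]
      rw [Option.getD_some]
      have hup2 : t.getD (2 * (j + 1)) 0 = pvSpec size w (2 * (j + 1)) :=
        hup (2 * (j + 1)) (by omega) (by omega)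
      have hup3 : t.getD (2 * (j + 1) + 1) 0 = pvSpec size w (2 * (j + 1) + 1) :=
        hup (2 * (j + 1) + 1) (by omega) (by omega)
      rw [show (t.getD (2 * (j + 1)) 0 + t.getD (2 * (j + 1) + 1) 0 : Int)
          = pvSpec size w (j + 1) by
        rw [hup2, hup3, ← pvSpec_node w (by omega : j + 1 < size) (by omega : 1 ≤ j + 1)]]
    · rw [List.getD_eq_getElem?_getD, List.getElem?_set_ne (by omega : j + 1 ≠ u),
        ← List.getD_eq_getElem?_getD]
      exact hup u (by omega) hu2

-- f0 loop: product of 1..N is N!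
lemma pv_prod (N : Nat) :
    (PySem.List.pyRange 1 ((N : Int) + 1)).foldl (fun f i => f * i) 1 = pvF N := by
  induction N with
  | zero =>
    rw [show ((0 : Nat) : Int) + 1 = 1 by norm_num, PySem.List.pyRange_one_eq_nil (le_refl 1)]
    simp [pvF]
  | succ N ih =>
    rw [show (((N + 1 : Nat)) : Int) + 1 = ((N : Int) + 1) + 1 by push_cast; ring,
      PySem.List.pyRange_one_succ_right (by omega : (1 : Int) ≤ (N : Int) + 1),
      List.foldl_append, ih]
    simp [pvF_succ]
    ring

-- growth loop: result is a power of two and ≥ n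
lemma pvGrow_pow (n : Nat) : ∀ (fuel s l : Nat), s = 2 ^ l → ∃ L, pvGrow n fuel s = 2 ^ L := by
  intro fuel
  induction fuel with
  | zero => intro s l hs; exact ⟨l, hs⟩
  | succ fuel ih =>
    intro s l hs
    rw [pvGrow]
    split
    · exact ih (2 * s) (l + 1) (by rw [hs, pow_succ]; ring)
    · exact ⟨l, hs⟩

lemma pvGrow_ge (n : Nat) : ∀ (fuel s : Nat), 1 ≤ s → n ≤ fuel + s → n ≤ pvGrow n fuel s := by
  intro fuel
  induction fuel with
  | zero => intro s _ h; simpa [pvGrow] using h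
  | succ fuel ih =>
    intro s hs h
    rw [pvGrow]
    split
    · exact ih (2 * s) (by omega) (by omega)
    · omega

-- erase the unique occurrence = eraseIdx at its index
lemma pv_nodup_erase_eraseIdx : ∀ (l : List Nat), l.Nodup → ∀ (j : Nat), (hj : j < l.length) →
    l.filter (fun i => ¬ i = l[j]) = l.eraseIdx j := by
  intro l
  induction l with
  | nil => intro _ j hj; simp at hj
  | cons x xs ih =>
    intro hnd j hj
    cases j with
    | zero =>
      simp only [List.getElem_cons_zero, List.eraseIdx_cons_zero, List.filter_cons]
      rw [if_neg (by simp)]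
      apply List.filter_eq_self.mpr
      intro a ha
      have hax : a ≠ x := by
        intro hax
        subst hax
        exact (List.nodup_cons.mp hnd).1 ha
      simpa using hax
    | succ j =>
      have hj' : j < xs.length := by simpa using hj
      simp only [List.getElem_cons_succ, List.eraseIdx_cons_succ, List.filter_cons]
      have hxj : x ≠ xs[j] := by
        intro he
        exact (List.nodup_cons.mp hnd).1 (he ▸ List.getElem_mem hj')
      rw [if_pos (by simpa using hxj)]
      exact congrArg (List.cons x) (ih (List.nodup_cons.mp hnd).2 j hj')

lemma pv_map_eraseIdx (f : Nat → Int) : ∀ (l : List Nat) (j : Nat),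
    (l.eraseIdx j).map f = (l.map f).eraseIdx j := by
  intro l
  induction l with
  | nil => intro j; simp
  | cons x xs ih =>
    intro j
    cases j with
    | zero => simp
    | succ j => simpa using ih j

-- B's main loop computes pvSel
lemma pv_BLoop {L : Nat} (size : Nat) (hsize : size = 2 ^ L) :
    ∀ (m : Nat) (t : List Int) (w : Nat → Int) (f k : Int) (ans es : List Int),
    pvInv size t w → (∀ i, w i = 0 ∨ w i = 1) →
    es = (pvLive size w 1).map (fun i : Nat => (i : Int) + 1) →
    es.length = m → (1 ≤ m → f = pvF (m - 1)) →
    ((PySem.List.pyRange (m : Int) 0 (-1)).foldl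
      (fun (st : List Int × Int × Int × List Int) mi =>
        let d := PySem.Int.mod (PySem.Int.floordiv st.2.2.1 st.2.1) mi
        let k' := PySem.Int.mod st.2.2.1 st.2.1
        let f' := if 1 < mi then PySem.Int.floordiv st.2.1 (mi - 1) else st.2.1
        let v := pvDescend st.1 size size 1 d
        (pvClear st.1 v, f', k', st.2.2.2 ++ [(v : Int) - (size : Int) + 1]))
      (t, f, k, ans)).2.2.2 = ans ++ pvSel m es k := by
  intro m
  induction m with
  | zero =>
    intro t w f k ans es hinv h01 hes hlen hf
    rw [Nat.cast_zero, PySem.List.pyRange_neg_one_eq_nil (le_refl (0 : Int)), List.foldl_nil]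
    simp [pvSel]
  | succ m ih =>
    intro t w f k ans es hinv h01 hes hlen hf
    have hsz1 : 1 ≤ size := by
      rw [hsize]
      exact Nat.one_le_two_pow
    have hfv : f = pvF m := by
      have := hf (by omega)
      simpa using this
    have hcast : ((m + 1 : Nat) : Int) = (m : Int) + 1 := by push_cast; ring
    rw [hcast, PySem.List.pyRange_neg_one_cons (by positivity : (0 : Int) < (m : Int) + 1),
      List.foldl_cons, show (m : Int) + 1 - 1 = (m : Int) by ring]
    -- notation for this round's digit and selected node
    set d := PySem.Int.mod (PySem.Int.floordiv k f) ((m : Int) + 1) with hd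
    have hd0 : 0 ≤ d := PySem.Int.mod_nonneg _ (by positivity)
    have hd1 : d < (m : Int) + 1 := PySem.Int.mod_lt _ (by positivity)
    have hlive_len : (pvLive size w 1).length = m + 1 := by
      rw [hes] at hlen
      simpa using hlen
    have hspec1 : pvSpec size w 1 = ((pvLive size w 1).length : Int) := by
      unfold pvSpec pvLive
      exact pv_sum01 w _ (fun i _ => h01 i)
    have hdesc := pvDescend_ok size hsize t w hinv h01 size 1 d (le_refl 1) (by omega)
      (by rw [one_mul]; exact le_of_lt (Nat.lt_two_pow_self))
      hd0 (by rw [hspec1, hlive_len]; exact_mod_cast hd1)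
    obtain ⟨hr1, hr2, hr3⟩ := hdesc
    set v0 := pvDescend t size size 1 d with hv0
    obtain ⟨hdn, hx0⟩ := List.getElem?_eq_some_iff.mp hr3
    have hdes : d.toNat < es.length := by
      rw [hes, List.length_map]
      exact hdn
    -- the emitted value is es[d.toNat]
    have hxval? : es[d.toNat]? = some ((v0 : Int) - (size : Int) + 1) := by
      rw [hes, List.getElem?_map, hr3, Option.map_some]
      congr 1
      omega
    have hxval : es[d.toNat]'hdes = (v0 : Int) - (size : Int) + 1 :=
      (List.getElem?_eq_some_iff.mp hxval?).2
    -- w at the selected leaf is 1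
    have hw1 : w (v0 - size) = 1 := by
      have hmem : (v0 - size) ∈ pvLive size w 1 := hx0 ▸ List.getElem_mem hdn
      have := List.of_mem_filter hmem
      simpa using this
    -- the new weight function
    set w' : Nat → Int := fun i => if i = v0 - size then w i - 1 else w i with hw'
    have hinv' : pvInv size (pvClear t v0) w' := by
      have h := pvClear_inv size hsize t w hinv hr1 hr2
      rwa [← hw'] at h
    have h01' : ∀ i, w' i = 0 ∨ w' i = 1 := by
      intro i
      simp only [hw']
      by_cases hi : i = v0 - size
      · subst hi
        rw [if_pos rfl, hw1]
        norm_num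
      · rw [if_neg hi]
        exact h01 i
    -- the new live list is the old one with index d.toNat erased
    have hlive' : pvLive size w' 1 = (pvLive size w 1).eraseIdx d.toNat := by
      have hnd1 : (pvLive size w 1).Nodup := by
        unfold pvLive
        exact (pvLeaves_nodup size hsize 1 (le_refl 1) (by omega)).filter _
      have hstep1 : pvLive size w' 1 = (pvLive size w 1).filter (fun i => ¬ i = v0 - size) := by
        unfold pvLive
        rw [List.filter_filter]
        apply List.filter_congr
        intro i _
        simp only [hw']
        by_cases hi : i = v0 - size
        · subst hi
          simp [hw1]
        · simp [hi]
      rw [hstep1]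
      have := pv_nodup_erase_eraseIdx (pvLive size w 1) hnd1 d.toNat hdn
      rw [← hx0]
      exact this
    have hes' : es.eraseIdx d.toNat = (pvLive size w' 1).map (fun i : Nat => (i : Int) + 1) := by
      rw [hlive', pv_map_eraseIdx, ← hes]
    have hlen' : (es.eraseIdx d.toNat).length = m := by
      rw [List.length_eraseIdx_of_lt hdes]
      omega
    have hf' : 1 ≤ m →
        (if (1 : Int) < (m : Int) + 1 then PySem.Int.floordiv f (m : Int) else f)
          = pvF (m - 1) := by
      intro hm
      rw [if_pos (by exact_mod_cast (by omega : (1 : Int) < (m : Int) + 1)), hfv]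
      have hmf : pvF m = (m : Int) * pvF (m - 1) := by
        have := pvF_succ (m - 1)
        rw [show m - 1 + 1 = m by omega] at this
        rw [this]
        congr 1
        omega
      rw [hmf, pv_floordiv_mul_self (by exact_mod_cast hm : (0 : Int) < (m : Int))]
    have happ := ih (pvClear t v0) w'
      (if (1 : Int) < (m : Int) + 1 then PySem.Int.floordiv f (m : Int) else f)
      (PySem.Int.mod k f)
      (ans ++ [(v0 : Int) - (size : Int) + 1]) (es.eraseIdx d.toNat)
      hinv' h01' hes' hlen' hf'
    have hpop2 : PySem.List.pop? es d
        = some ((v0 : Int) - (size : Int) + 1, es.eraseIdx d.toNat) := by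
      have hpop := PySem.List.pop?_natCast es d.toNat hdes
      rw [hxval] at hpop
      rw [← show ((d.toNat : Nat) : Int) = d from Int.toNat_of_nonneg hd0]
      exact hpop
    refine happ.trans ?_
    conv_rhs => rw [pvSel]
    rw [← hfv, ← hd, hpop2]
    simp

lemma pv_filter_range (N : Nat) : ∀ s : Nat, N ≤ s →
    (List.range s).filter (fun i => decide (i < N)) = List.range N := by
  intro s
  induction s with
  | zero =>
    intro h
    rw [show N = 0 by omega]
    rfl
  | succ s ih =>
    intro h
    by_cases hNs : N ≤ s
    · rw [List.range_succ, List.filter_append, ih hNs]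
      have hone : List.filter (fun i => decide (i < N)) [s] = [] := by
        simp [show ¬ s < N by omega]
      rw [hone, List.append_nil]
    · have hNe : N = s + 1 := by omega
      subst hNe
      apply List.filter_eq_self.mpr
      intro a ha
      simp only [List.mem_range] at ha
      simpa using ha

-- ===== VERDICT (by name: the statement is the Claim_ definition above) =====
theorem solution_spec : Claim_equal_solution := by
  intro n k hdom hpre
  unfold Spec_solution
  by_cases hn : n ≤ 0
  · simp only [solution, solution_alt, if_pos hn,
      PySem.List.pyRange_one_eq_nil (show n ≤ (0 : Int) from hn)]
    simp [solutionLoop]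
  · have hn1 : 1 ≤ n := by omega
    set N := n.toNat with hN
    have hnN : n = (N : Int) := by omega
    have hN1 : 1 ≤ N := by omega
    set es0 : List Int := (List.range N).map (fun i : Nat => (i : Int) + 1) with hes0
    have hElem : (PySem.List.pyRange 0 n).map (fun i => i + 1) = es0 := by
      rw [PySem.List.pyRange_one 0 n, List.map_map, hes0,
        show (n - 0).toNat = N by omega]
      apply List.map_congr_left
      intro x _
      simp
    have hnd : es0.Nodup := by
      rw [hes0]
      exact List.Nodup.map (fun a b hab => by omega) List.nodup_range
    have hlen0 : es0.length = N := by rw [hes0]; simp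
    -- A computes pvSel
    have hA : solution n k = pvSel N es0 (k - 1) := by
      simp only [solution]
      rw [hElem, hlen0, show n + 1 = ((N : Nat) : Int) + 1 by omega, pv_facList N]
      have hbound : 2 ≤ N → -pvF N ≤ k - 1 ∧ k - 1 < pvF N := by
        intro h2
        have hdom' : -2147483648 ≤ k ∧ k ≤ 2147483648 := by
          simp only [Dom_solution, pvDomInt, Bool.and_eq_true, decide_eq_true_eq] at hdom
          exact hdom.2
        rcases hpre with h | h | h
        · omega
        · have h13 : (6227020800 : Int) ≤ pvF N := by
            have h1 : Nat.factorial 13 ≤ Nat.factorial N := Nat.factorial_le (by omega)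
            have hI : ((Nat.factorial 13 : Nat) : Int) ≤ pvF N := by
              unfold pvF
              exact_mod_cast h1
            have h3 : Nat.factorial 13 = 6227020800 := by norm_num [Nat.factorial]
            rw [h3] at hI
            exact_mod_cast hI
          omega
        · have hle : (Nat.factorial (min N 12) : Int) ≤ pvF N := by
            unfold pvF
            exact_mod_cast Nat.factorial_le (min_le_left N 12)
          rw [← hN] at h
          omega
      rw [pv_ALoop N es0 [] (k - 1) ((List.range (N + 1)).map (fun j => pvF j)) hnd hlen0
        (fun j hj => pv_fac_get (by omega)) hbound]
      simp
    -- B computes pvSel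
    have hB : solution_alt n k = pvSel N es0 (k - 1) := by
      simp only [solution_alt]
      rw [if_neg hn, hnN]
      simp only [Int.toNat_natCast]
      set size := pvGrow N N 1 with hsz
      obtain ⟨L, hL⟩ := pvGrow_pow N N 1 0 (by norm_num)
      rw [← hsz] at hL
      have hNs : N ≤ size := by
        rw [hsz]
        exact pvGrow_ge N N 1 (le_refl 1) (by omega)
      set w0 : Nat → Int := fun i => if i < N then (1 : Int) else 0 with hw0
      have h01 : ∀ i, w0 i = 0 ∨ w0 i = 1 := by
        intro i
        simp only [hw0]
        by_cases hi : i < N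
        · right
          rw [if_pos hi]
        · left
          rw [if_neg hi]
      have htlen : ((List.range N).foldl (fun t i => t.set (size + i) 1)
          (List.replicate (2 * size) (0 : Int))).length = 2 * size := by
        have h := pv_leaf_fold_length size (List.range N) (List.replicate (2 * size) (0 : Int))
        rw [List.length_replicate] at h
        exact h
      have hinvt := pv_build_internal size w0 (size - 1)
        ((List.range N).foldl (fun t i => t.set (size + i) 1)
          (List.replicate (2 * size) (0 : Int)))
        (by omega) htlen
        (by
          intro u hu hu2
          rw [pv_build_leaf size N hNs u hu2, pvSpec_leaf w0 (by omega) (by omega)]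
          simp only [hw0]
          by_cases hc : u < size + N
          · rw [if_pos ⟨by omega, hc⟩, if_pos (by omega)]
          · rw [if_neg (show ¬ (size ≤ u ∧ u < size + N) by omega), if_neg (by omega)])
      have hlive1 : pvLive size w0 1 = List.range N := by
        unfold pvLive
        rw [pvLeaves_root size hL]
        calc (List.range size).filter (fun i => decide (w0 i = 1))
            = (List.range size).filter (fun i => decide (i < N)) := by
              apply List.filter_congr
              intro i _
              simp only [hw0]
              by_cases hi : i < N
              · simp [hi]
              · simp [hi]
        _ = List.range N := pv_filter_range N size hNs
      have hes : es0 = (pvLive size w0 1).map (fun i : Nat => (i : Int) + 1) := by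
        rw [hlive1]
      have hprod : (PySem.List.pyRange 1 (N : Int)).foldl (fun f i => f * i) 1
          = pvF (N - 1) := by
        have h := pv_prod (N - 1)
        rw [show ((N - 1 : Nat) : Int) + 1 = (N : Int) by omega] at h
        exact h
      rw [hprod]
      rw [pv_BLoop size hL N _ w0 (pvF (N - 1)) (k - 1) [] es0 hinvt h01 hes hlen0
        (fun _ => rfl)]
      simp
    rw [hA, hB]
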